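-- pv_equiv track=rewrite | github.com/feipenghhq/Verilog-Design-Example | arbitration/tb/rr_arbiter/test.py | arbiter_model
-- ===== SOURCE A (Python) =====
-- def arbiter_model(req, base, width):
--     """ Arbiter. base determine the priority"""
--     pos = 0
--     pos_vld = False
--     for i in range(width):
--         bit = (req >> i) & 0x1
--         if bit and ((1 << i) == base):
--             return 1 << i
--         if bit and ((1 << i) > base):
--             return 1 << i
--         if bit and ((1 << i) < base) and not pos_vld:
--             pos = i
--             pos_vld = True
--     if pos_vld:
--         return 1 << pos
--     else:
--         return 0
-- ===== SOURCE B (Python) =====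
-- def _lowbit(x):
--     return x - (x & (x - 1))
--
--
-- def arbiter_model(req, base, width):
--     """Round-robin arbiter grant computed with bit tricks instead of a bit-by-bit loop."""
--     if width <= 0:
--         return 0
--     mask = req % (1 << width)
--     k = (base - 1).bit_length() if base > 0 else 0
--     high = (mask >> k) << k
--     if high:
--         return _lowbit(high)
--     low = mask - high
--     if low:
--         return _lowbit(low)
--     return 0
-- ===== Notes on version B (the rewrite author's own statement) =====
-- stated objective: faster
-- what changed: Replaced the per-bit scan over range(width) by O(1) big-int bit arithmetic: mask the request to width bits, split it at the power-of-two threshold derived from base via bit_length, and isolate the lowest set bit of the high (else low) part with x - (x & (x-1)).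
import Mathlib
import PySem

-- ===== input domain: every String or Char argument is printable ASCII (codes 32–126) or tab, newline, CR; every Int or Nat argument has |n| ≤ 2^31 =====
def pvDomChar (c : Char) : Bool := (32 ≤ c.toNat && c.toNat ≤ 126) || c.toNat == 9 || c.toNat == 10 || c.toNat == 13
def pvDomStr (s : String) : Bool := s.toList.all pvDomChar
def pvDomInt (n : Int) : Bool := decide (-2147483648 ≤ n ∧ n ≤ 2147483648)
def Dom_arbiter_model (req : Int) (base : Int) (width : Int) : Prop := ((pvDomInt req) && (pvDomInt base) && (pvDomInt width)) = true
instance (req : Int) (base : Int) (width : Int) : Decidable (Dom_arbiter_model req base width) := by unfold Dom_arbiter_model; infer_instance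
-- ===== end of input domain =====

-- B replaces A's per-bit scan over range(width) by direct bit arithmetic on the masked request;
-- the return values are proved equal on all inputs.

-- ===== PORT A =====
-- A's for-loop with its early returns, as structural recursion over range(width)
def arbLoop (req base : Int) (pos : Int) (posVld : Bool) (i : Int) : Nat → Int
  | 0 => if posVld then (1 : Int) <<< pos.toNat else 0
  | n + 1 =>
    let bit := PySem.Int.band (req >>> i.toNat) 1
    if bit ≠ 0 ∧ (1 : Int) <<< i.toNat = base then (1 : Int) <<< i.toNat
    else if bit ≠ 0 ∧ (1 : Int) <<< i.toNat > base then (1 : Int) <<< i.toNat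
    else if bit ≠ 0 ∧ (1 : Int) <<< i.toNat < base ∧ posVld = false then
      arbLoop req base i true (i + 1) n
    else arbLoop req base pos posVld (i + 1) n

def arbiter_model (req : Int) (base : Int) (width : Int) : Int :=
  arbLoop req base 0 false 0 width.toNat

-- ===== PORT B =====
-- _lowbit(x) = x - (x & (x - 1))
def lowestSetBit (x : Int) : Int := x - PySem.Int.band x (x - 1)

def arbiter_model_alt (req : Int) (base : Int) (width : Int) : Int :=
  if width ≤ 0 then 0
  else
    let mask := PySem.Int.mod req ((1 : Int) <<< width.toNat)
    let k := if 0 < base then PySem.Int.bitLength (base - 1) else 0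
    let high := (mask >>> k) <<< k
    if high ≠ 0 then lowestSetBit high
    else
      let low := mask - high
      if low ≠ 0 then lowestSetBit low
      else 0

-- ===== PRECONDITION & SPEC =====
def Spec_arbiter_model (req : Int) (base : Int) (width : Int) (out : Int) : Prop := out = arbiter_model_alt req base width
instance (req : Int) (base : Int) (width : Int) (out : Int) : Decidable (Spec_arbiter_model req base width out) := by unfold Spec_arbiter_model; infer_instance

-- ===== CLAIM (what is proved, stated in full; the proofs are below) =====
def Claim_equal_arbiter_model : Prop := ∀ (req : Int) (base : Int) (width : Int), Dom_arbiter_model req base width → Spec_arbiter_model req base width (arbiter_model req base width)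

-- ===== LEMMAS AND PROOFS =====

-- the closed form that A's loop computes from position j upward, for the request reduced
-- mod 2^N and the base threshold k (characterised by: base ≤ 2^i ↔ k ≤ i)
def arbClosed (mask : Int) (k j : Nat) (pos : Int) (posVld : Bool) : Int :=
  let K := max j k
  let hi := (mask / 2 ^ K) * 2 ^ K
  if hi ≠ 0 then lowestSetBit hi
  else if posVld then (1 : Int) <<< pos.toNat
  else
    let lo := (mask / 2 ^ j) * 2 ^ j
    if lo ≠ 0 then lowestSetBit lo else 0

lemma odd_and_pred (m : Nat) (hm : m % 2 = 1) (t : Nat) :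
    (m.testBit t && (m - 1).testBit t) = (m - 1).testBit t := by
  cases t with
  | zero => simp [Nat.testBit_zero]; omega
  | succ t =>
    rw [Nat.testBit_succ, Nat.testBit_succ]
    have : m / 2 = (m - 1) / 2 := by omega
    rw [this, Bool.and_self]

lemma land_pred_of_two_pow_mul_odd (j m : Nat) (hm : m % 2 = 1) :
    (2 ^ j * m) &&& (2 ^ j * m - 1) = 2 ^ j * (m - 1) := by
  have h0 : (0:Nat) < 2 ^ j := Nat.two_pow_pos j
  obtain ⟨m', rfl⟩ : ∃ m', m = m' + 1 := ⟨m - 1, by omega⟩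
  have hsub : 2 ^ j * (m' + 1) - 1 = 2 ^ j * m' + (2 ^ j - 1) := by
    rw [Nat.mul_add]; omega
  apply Nat.eq_of_testBit_eq
  intro i
  rw [Nat.testBit_land, hsub,
    Nat.testBit_two_pow_mul_add _ (by omega : (2:Nat)^j - 1 < 2^j) i,
    Nat.testBit_two_pow_mul, Nat.testBit_two_pow_mul]
  simp only [Nat.add_sub_cancel]
  by_cases hi : i < j
  · simp [hi, show ¬ i ≥ j by omega]
  · simp only [if_neg hi, show i ≥ j by omega, decide_true, Bool.true_and]
    have := odd_and_pred (m' + 1) hm (i - j)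
    simpa using this

lemma lowestSetBit_two_pow_mul_odd (j m : Nat) (hm : m % 2 = 1) :
    lowestSetBit ((2 ^ j * m : Nat) : Int) = 2 ^ j := by
  have hm1 : 1 ≤ m := by omega
  have hn : 1 ≤ 2 ^ j * m := by
    have := Nat.two_pow_pos j; exact Nat.one_le_iff_ne_zero.mpr (by positivity)
  unfold lowestSetBit
  have e1 : ((2 ^ j * m : Nat) : Int) - 1 = ((2 ^ j * m - 1 : Nat) : Int) := by
    push_cast [hn]; ring
  rw [e1, PySem.Int.band_natCast, land_pred_of_two_pow_mul_odd j m hm]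
  have : (2:Nat) ^ j * m - 2 ^ j * (m - 1) = 2 ^ j := by
    obtain ⟨m', rfl⟩ : ∃ m', m = m' + 1 := ⟨m - 1, by omega⟩
    simp [Nat.mul_add]
  rw [← Nat.cast_sub (Nat.mul_le_mul_left _ (by omega)), this]
  push_cast; ring

lemma bit_of_emod (req : Int) (N j : Nat) (hj : j < N) :
    (req / 2 ^ j) % 2 = ((req % 2 ^ N) / 2 ^ j) % 2 := by
  have hsplit : req = req % 2 ^ N + (2 ^ (N - j - 1) * (req / 2 ^ N) * 2) * 2 ^ j := by
    have h1 : (2:Int) ^ N = 2 ^ (N - j - 1) * 2 * 2 ^ j := by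
      rw [← pow_succ, ← pow_add]; congr 1; omega
    have h := Int.mul_ediv_add_emod req (2 ^ N)
    calc req = 2 ^ N * (req / 2 ^ N) + req % 2 ^ N := by omega
    _ = req % 2 ^ N + 2 ^ (N - j - 1) * (req / 2 ^ N) * 2 * 2 ^ j := by rw [h1]; ring
  have h2 : req / 2 ^ j = (req % 2 ^ N) / 2 ^ j + 2 ^ (N - j - 1) * (req / 2 ^ N) * 2 := by
    conv_lhs => rw [hsplit]
    rw [Int.add_mul_ediv_right _ _ (by positivity)]
  rw [h2]
  omega

lemma threshold_char (base : Int) :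
    ∀ i : Nat, base ≤ 2 ^ i ↔ (if 0 < base then PySem.Int.bitLength (base - 1) else 0) ≤ i := by
  intro i
  split_ifs with hb
  · by_cases h1 : base = 1
    · subst h1
      norm_num [PySem.Int.bitLength_zero]
      have : (0:Int) < 2 ^ i := by positivity
      omega
    · have hb2 : 2 ≤ base := by omega
      set k := PySem.Int.bitLength (base - 1) with hk
      have ha : ((base - 1).natAbs : Int) = base - 1 := Int.natAbs_of_nonneg (by omega)
      have hlt : (base - 1).natAbs < 2 ^ k := PySem.Int.lt_two_pow_bitLength (base - 1)
      have hge : 2 ^ (k - 1) ≤ (base - 1).natAbs :=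
        PySem.Int.two_pow_bitLength_le (base - 1) (by omega)
      constructor
      · intro h
        by_contra hik
        have hik' : i ≤ k - 1 := by omega
        have : (2:Nat) ^ i ≤ 2 ^ (k - 1) := Nat.pow_le_pow_right (by omega) hik'
        have h2 : (2:Nat) ^ i ≤ (base - 1).natAbs := le_trans this hge
        have : ((2:Nat) ^ i : Int) ≤ base - 1 := by rw [← ha]; exact_mod_cast h2
        push_cast at this; omega
      · intro h
        have h2 : (2:Nat) ^ k ≤ 2 ^ i := Nat.pow_le_pow_right (by omega) h
        have h3 : base - 1 < ((2:Nat) ^ k : Int) := by rw [← ha]; exact_mod_cast hlt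
        have : ((2:Nat) ^ k : Int) ≤ ((2:Nat) ^ i : Int) := by exact_mod_cast h2
        push_cast at h3 this; omega
  · simp only [Nat.zero_le, iff_true]
    have : (0:Int) < 2 ^ i := by positivity
    omega

lemma odd_chunk (mask : Int) (j : Nat) (h0 : 0 ≤ mask) (hodd : mask / 2 ^ j % 2 = 1) :
    (mask / 2 ^ j) * 2 ^ j ≠ 0 ∧ lowestSetBit ((mask / 2 ^ j) * 2 ^ j) = 2 ^ j := by
  lift mask to Nat using h0 with M
  have hc : (M : Int) / 2 ^ j = ((M / 2 ^ j : Nat) : Int) := by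
    rw [Int.natCast_div]; push_cast; ring_nf
  rw [hc] at hodd ⊢
  have hoddN : M / 2 ^ j % 2 = 1 := by
    by_contra hne
    have h2 : M / 2 ^ j % 2 = 0 := by omega
    rw [show ((M / 2 ^ j : Nat) : Int) % 2 = ((M / 2 ^ j % 2 : Nat) : Int) by push_cast; ring_nf, h2] at hodd
    simp at hodd
  have he : ((M / 2 ^ j : Nat) : Int) * 2 ^ j = ((2 ^ j * (M / 2 ^ j) : Nat) : Int) := by
    push_cast; ring
  rw [he, lowestSetBit_two_pow_mul_odd j _ hoddN]
  refine ⟨?_, rfl⟩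
  have h1 : 2 ^ j * (M / 2 ^ j) ≠ 0 := by
    have := Nat.two_pow_pos j
    have hne0 : M / 2 ^ j ≠ 0 := by intro h; rw [h] at hoddN; simp at hoddN
    have : 1 ≤ M / 2 ^ j := Nat.one_le_iff_ne_zero.mpr hne0
    positivity
  exact_mod_cast h1

lemma arbClosed_step_even (mask : Int) (k j : Nat) (pos : Int) (posVld : Bool)
    (heven : mask / 2 ^ j % 2 = 0) :
    arbClosed mask k j pos posVld = arbClosed mask k (j + 1) pos posVld := by
  have hdd : mask / 2 ^ (j + 1) = (mask / 2 ^ j) / 2 := by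
    rw [pow_succ, ← Int.ediv_ediv_of_nonneg (by positivity : (0:Int) ≤ 2 ^ j)]
  have key : (mask / 2 ^ j) * 2 ^ j = (mask / 2 ^ (j + 1)) * 2 ^ (j + 1) := by
    have h2 : mask / 2 ^ j = 2 * (mask / 2 ^ (j + 1)) := by omega
    rw [h2, pow_succ]; ring
  simp only [arbClosed]
  by_cases hk : k ≤ j
  · rw [max_eq_left hk, max_eq_left (by omega : k ≤ j + 1), key]
  · rw [max_eq_right (by omega : j ≤ k), max_eq_right (by omega : j + 1 ≤ k), key]

lemma arbClosed_mark (mask : Int) (k j : Nat) (pos : Int)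
    (h0 : 0 ≤ mask) (hjk : j < k) (hodd : mask / 2 ^ j % 2 = 1) :
    arbClosed mask k (j + 1) (j : Int) true = arbClosed mask k j pos false := by
  obtain ⟨hne, hlow⟩ := odd_chunk mask j h0 hodd
  simp only [arbClosed, max_eq_right (by omega : j + 1 ≤ k), max_eq_right (by omega : j ≤ k)]
  by_cases hhi : (mask / 2 ^ k) * 2 ^ k ≠ 0
  · rw [if_pos hhi, if_pos hhi]
  · rw [if_neg hhi, if_neg hhi, if_pos hne, hlow]
    simp [Int.shiftLeft_eq]

lemma arbLoop_eq_arbClosed (req base : Int) (N k : Nat)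
    (Hk : ∀ i : Nat, base ≤ 2 ^ i ↔ k ≤ i) :
    ∀ (n j : Nat) (pos : Int) (posVld : Bool), j + n = N →
      arbLoop req base pos posVld (j : Int) n
        = arbClosed (req % 2 ^ N) k j pos posVld := by
  have hN0 : (0:Int) < 2 ^ N := by positivity
  have hm0 : 0 ≤ req % 2 ^ N := Int.emod_nonneg req (by positivity)
  have hmlt : req % 2 ^ N < 2 ^ N := Int.emod_lt_of_pos req hN0
  intro n
  induction n with
  | zero =>
    intro j pos posVld hj
    have hj' : j = N := by omega
    subst hj'
    have hdiv0 : ∀ (K : Nat), j ≤ K → (req % 2 ^ j) / 2 ^ K = 0 := by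
      intro K hK
      exact Int.ediv_eq_zero_of_lt hm0
        (lt_of_lt_of_le hmlt (pow_le_pow_right₀ (by omega) hK))
    simp [arbLoop, arbClosed, hdiv0 (max j k) (le_max_left _ _), hdiv0 j (le_refl _)]
  | succ n ih =>
    intro j pos posVld hj
    have hjN : j < N := by omega
    have hrest : ((j : Int) + 1) = ((j + 1 : Nat) : Int) := by push_cast; ring
    have hbit_eq : PySem.Int.band (req >>> ((j : Int)).toNat) 1 = (req % 2 ^ N) / 2 ^ j % 2 := by
      rw [Int.toNat_natCast, PySem.Int.band_one, PySem.Int.mod_eq_emod_of_pos (by omega),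
        Int.shiftRight_eq_div_pow,
        show (((2:Nat) ^ j : Nat) : Int) = (2:Int) ^ j by push_cast; ring]
      exact bit_of_emod req N j hjN
    have hshl : (1 : Int) <<< ((j : Int)).toNat = 2 ^ j := by
      rw [Int.toNat_natCast, Int.shiftLeft_eq, one_mul]
    have hb01 : 0 ≤ (req % 2 ^ N) / 2 ^ j % 2 ∧ (req % 2 ^ N) / 2 ^ j % 2 < 2 :=
      ⟨Int.emod_nonneg _ (by omega), Int.emod_lt_of_pos _ (by omega)⟩
    simp only [arbLoop, hbit_eq, hshl, hrest]
    by_cases hbit : (req % 2 ^ N) / 2 ^ j % 2 = 1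
    · by_cases hk : k ≤ j
      · have hbase : base ≤ 2 ^ j := (Hk j).mpr hk
        obtain ⟨hne, hlow⟩ := odd_chunk (req % 2 ^ N) j hm0 hbit
        have hRHS : arbClosed (req % 2 ^ N) k j pos posVld = 2 ^ j := by
          simp only [arbClosed, max_eq_left hk]
          rw [if_pos hne, hlow]
        by_cases heq : (2 : Int) ^ j = base
        · rw [if_pos ⟨by omega, heq⟩, hRHS]
        · rw [if_neg (by tauto), if_pos ⟨by omega, by omega⟩, hRHS]
      · have hbase : ¬ base ≤ 2 ^ j := fun h => hk ((Hk j).mp h)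
        rw [if_neg (by rintro ⟨-, h⟩; omega), if_neg (by rintro ⟨-, h⟩; omega)]
        cases posVld with
        | false =>
          rw [if_pos ⟨by omega, by omega, rfl⟩, ih (j + 1) (j : Int) true (by omega)]
          exact arbClosed_mark (req % 2 ^ N) k j pos hm0 (by omega) hbit
        | true =>
          rw [if_neg (by rintro ⟨-, -, h⟩; simp at h),
            ih (j + 1) pos true (by omega)]
          have hK : max j k = k := max_eq_right (by omega)
          have hK1 : max (j + 1) k = k := max_eq_right (by omega)
          simp only [arbClosed, hK, hK1]
          split_ifs <;> rfl
    · have hb0 : (req % 2 ^ N) / 2 ^ j % 2 = 0 := by omega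
      rw [if_neg (by rintro ⟨h, -⟩; omega), if_neg (by rintro ⟨h, -⟩; omega),
        if_neg (by rintro ⟨h, -, -⟩; omega), ih (j + 1) pos posVld (by omega)]
      exact (arbClosed_step_even (req % 2 ^ N) k j pos posVld hb0).symm

-- ===== VERDICT (by name: the statement is the Claim_ definition above) =====
theorem arbiter_model_spec : Claim_equal_arbiter_model := by
  intro req base width _
  unfold Spec_arbiter_model arbiter_model arbiter_model_alt
  by_cases hw : width ≤ 0
  · rw [if_pos hw]
    simp [arbLoop, Int.toNat_of_nonpos hw]
  · rw [if_neg hw]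
    set N := width.toNat with hN
    set k := (if 0 < base then PySem.Int.bitLength (base - 1) else 0) with hkdef
    have hwN : ((N : Nat) : Int) = width := Int.toNat_of_nonneg (by omega)
    have hL := arbLoop_eq_arbClosed req base N k (threshold_char base) N 0 0 false (by omega)
    rw [show ((0:Nat):Int) = (0:Int) by norm_num] at hL
    rw [hL]
    have hmask : PySem.Int.mod req ((1:Int) <<< N) = req % 2 ^ N := by
      rw [Int.shiftLeft_eq, one_mul]
      exact PySem.Int.mod_eq_emod_of_pos (by positivity)
    rw [hmask]
    have hhigh : ((req % 2 ^ N) >>> k) <<< k = (req % 2 ^ N) / 2 ^ k * 2 ^ k := by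
      rw [Int.shiftRight_eq_div_pow, Int.shiftLeft_eq,
        show (((2:Nat) ^ k : Nat) : Int) = (2:Int) ^ k by push_cast; ring]
    simp only [hhigh, arbClosed, max_eq_right (Nat.zero_le k), pow_zero, Int.ediv_one, mul_one,
      Bool.false_eq_true, if_false]
    by_cases hh : (req % 2 ^ N) / 2 ^ k * 2 ^ k ≠ 0
    · rw [if_pos hh, if_pos hh]
    · rw [if_neg hh, if_neg hh, not_not.mp hh, sub_zero]
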